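-- pv_equiv track=rewrite | github.com/Hadi-Obeid/qr_gen | qr.py | eval_row
-- ===== SOURCE A (Python) =====
-- def eval_row(row):
--     streak = {"0": [], "1": []}
--     count_ones = 0
--     count_zeros = 0
--     for bit in row:
--         if bit == "1":
--             streak["0"].append(count_zeros)
--             count_zeros = 0
--
--             count_ones += 1
--         elif bit == "0":
--             streak["1"].append(count_ones)
--             count_ones = 0
--
--             count_zeros += 1
--     streak["0"].append(count_zeros)
--     streak["1"].append(count_ones)
--     return sum([i for i in map(lambda x: 3 + (x - 5) if x >= 5 else 0, (streak["0"] + streak["1"]))])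
-- ===== SOURCE B (Python) =====
-- def eval_row(row):
--     # Run-scan: filter to the binary characters (non-binary items are transparent
--     # in A and merge adjacent runs), then scan maximal runs with two indices.
--     bits = [c for c in row if c == "0" or c == "1"]
--     total = 0
--     i = 0
--     n = len(bits)
--     while i < n:
--         j = i + 1
--         while j < n and bits[j] == bits[i]:
--             j += 1
--         L = j - i
--         if L >= 5:
--             total += 3 + (L - 5)
--         i = j
--     return total
-- ===== Notes on version B (the rewrite author's own statement) =====
-- stated objective: alternative
-- what changed: Replaces A's dict of two streak lists with transition bookkeeping by a filter-to-binary-chars step followed by a two-index scan over maximal runs, tallying the penalty per run directly.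
import Mathlib
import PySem

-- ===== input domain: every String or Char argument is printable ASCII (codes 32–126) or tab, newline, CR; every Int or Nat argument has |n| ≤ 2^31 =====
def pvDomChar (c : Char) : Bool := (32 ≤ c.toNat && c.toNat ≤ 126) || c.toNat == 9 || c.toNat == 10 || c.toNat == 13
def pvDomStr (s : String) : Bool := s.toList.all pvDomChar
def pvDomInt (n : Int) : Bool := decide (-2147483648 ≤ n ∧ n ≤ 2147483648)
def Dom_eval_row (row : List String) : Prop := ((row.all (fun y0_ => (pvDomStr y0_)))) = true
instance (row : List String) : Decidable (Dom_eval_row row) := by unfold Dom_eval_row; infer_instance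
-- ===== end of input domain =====

-- B replaces A's two streak lists and transition bookkeeping by a filter-then-run-scan (idiomatic decomposition; same cost).

-- ===== PORT A =====
-- A's lambda x: 3 + (x - 5) if x >= 5 else 0
def pvPen (x : Int) : Int := if x ≥ 5 then 3 + (x - 5) else 0

-- A's loop state: (streak["0"], streak["1"], count_zeros, count_ones); the dict has
-- the two fixed keys "0"/"1", rendered as the two list components.
def pvStepA (st : List Int × List Int × Int × Int) (bit : String) :
    List Int × List Int × Int × Int :=
  match st with
  | (s0, s1, z, o) =>
    if bit == "1" then (s0 ++ [z], s1, 0, o + 1)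
    else if bit == "0" then (s0, s1 ++ [o], z + 1, 0)
    else (s0, s1, z, o)

def eval_row (row : List String) : Int :=
  match row.foldl pvStepA ([], [], 0, 0) with
  | (s0, s1, z, o) => (((s0 ++ [z]) ++ (s1 ++ [o])).map pvPen).sum

-- ===== PORT B =====
-- the inner while loop: one maximal run via takeWhile/dropWhile, then recurse on the rest
def pvRunPen : List String → Int
  | [] => 0
  | x :: xs =>
    let L : Int := 1 + ((xs.takeWhile (fun c => c == x)).length : Int)
    (if L ≥ 5 then 3 + (L - 5) else 0) + pvRunPen (xs.dropWhile (fun c => c == x))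
termination_by l => l.length
decreasing_by
  simpa using Nat.lt_succ_of_le (List.length_dropWhile_le (fun c => c == x) xs)

def eval_row_alt (row : List String) : Int :=
  pvRunPen (row.filter (fun c => c == "0" || c == "1"))

-- ===== PRECONDITION & SPEC =====
def Spec_eval_row (row : List String) (out : Int) : Prop := out = eval_row_alt row
instance (row : List String) (out : Int) : Decidable (Spec_eval_row row out) := by unfold Spec_eval_row; infer_instance

-- ===== CLAIM (what is proved, stated in full; the proofs are below) =====
def Claim_equal_eval_row : Prop := ∀ (row : List String), Dom_eval_row row → Spec_eval_row row (eval_row row)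

-- ===== LEMMAS AND PROOFS =====

-- penalty still owed by A's loop, given current counts z (zeros) and o (ones)
def pvLoopPen : Int → Int → List String → Int
  | z, o, [] => pvPen z + pvPen o
  | z, o, b :: t =>
    if b == "1" then pvPen z + pvLoopPen 0 (o + 1) t
    else if b == "0" then pvPen o + pvLoopPen (z + 1) 0 t
    else pvLoopPen z o t

theorem pvPen_zero : pvPen 0 = 0 := by decide

theorem pvA_loop (l : List String) :
    ∀ (s0 s1 : List Int) (z o : Int),
    ((((l.foldl pvStepA (s0, s1, z, o)).1 ++ [(l.foldl pvStepA (s0, s1, z, o)).2.2.1])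
      ++ ((l.foldl pvStepA (s0, s1, z, o)).2.1 ++ [(l.foldl pvStepA (s0, s1, z, o)).2.2.2])).map pvPen).sum
    = (s0.map pvPen).sum + (s1.map pvPen).sum + pvLoopPen z o l := by
  induction l with
  | nil =>
    intro s0 s1 z o
    simp [pvLoopPen, List.map_append, List.sum_append]
    ring
  | cons b t ih =>
    intro s0 s1 z o
    rw [List.foldl_cons]
    by_cases h1 : b == "1"
    · simp only [pvStepA, h1, if_pos]
      rw [ih]
      simp [pvLoopPen, h1, List.map_append, List.sum_append]
      ring
    · by_cases h0 : b == "0"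
      · simp only [pvStepA, h1, h0, if_pos, Bool.false_eq_true, if_false]
        rw [ih]
        simp [pvLoopPen, h1, h0, List.map_append, List.sum_append]
        ring
      · simp only [pvStepA, h1, h0, Bool.false_eq_true, if_false]
        rw [ih]
        simp [pvLoopPen, h1, h0]

theorem pvLoopPen_filter (l : List String) :
    ∀ (z o : Int), pvLoopPen z o l = pvLoopPen z o (l.filter (fun c => c == "0" || c == "1")) := by
  induction l with
  | nil => intro z o; rfl
  | cons b t ih =>
    intro z o
    by_cases h1 : b == "1"
    · simp [pvLoopPen, h1, ih]
    · by_cases h0 : b == "0"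
      · simp [pvLoopPen, h1, h0, ih]
      · simp [pvLoopPen, h1, h0, ih]

theorem pvRuns (l : List String) (hb : ∀ c ∈ l, c = "0" ∨ c = "1") :
    (∀ o : Int, pvLoopPen 0 o l
        = pvPen (o + ((l.takeWhile (fun c => c == "1")).length : Int))
          + pvRunPen (l.dropWhile (fun c => c == "1")))
    ∧ (∀ z : Int, pvLoopPen z 0 l
        = pvPen (z + ((l.takeWhile (fun c => c == "0")).length : Int))
          + pvRunPen (l.dropWhile (fun c => c == "0"))) := by
  induction l with
  | nil =>
    constructor <;> intro x <;> simp [pvLoopPen, pvRunPen, pvPen_zero]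
  | cons b t ih =>
    have hbt : ∀ c ∈ t, c = "0" ∨ c = "1" := fun c hc => hb c (List.mem_cons_of_mem _ hc)
    have ih' := ih hbt
    rcases hb b (List.mem_cons_self) with h0 | h1
    · subst h0
      constructor
      · intro o
        have h : pvLoopPen 0 o ("0" :: t) = pvPen o + pvLoopPen 1 0 t := by
          simp [pvLoopPen]
        rw [h, ih'.2 1]
        simp [pvRunPen, pvPen]
      · intro z
        have h : pvLoopPen z 0 ("0" :: t) = pvPen 0 + pvLoopPen (z + 1) 0 t := by
          simp [pvLoopPen]
        rw [h, ih'.2 (z + 1), pvPen_zero]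
        simp [pvPen]
        try (split_ifs <;> omega)
    · subst h1
      constructor
      · intro o
        have h : pvLoopPen 0 o ("1" :: t) = pvPen 0 + pvLoopPen 0 (o + 1) t := by
          simp [pvLoopPen]
        rw [h, ih'.1 (o + 1), pvPen_zero]
        simp [pvPen]
        try (split_ifs <;> omega)
      · intro z
        have h : pvLoopPen z 0 ("1" :: t) = pvPen z + pvLoopPen 0 1 t := by
          simp [pvLoopPen]
        rw [h, ih'.1 1]
        simp [pvRunPen, pvPen]

theorem eval_row_eq (row : List String) : eval_row row = eval_row_alt row := by
  have hA : eval_row row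
      = ((((row.foldl pvStepA ([], [], 0, 0)).1 ++ [(row.foldl pvStepA ([], [], 0, 0)).2.2.1])
          ++ ((row.foldl pvStepA ([], [], 0, 0)).2.1 ++ [(row.foldl pvStepA ([], [], 0, 0)).2.2.2])).map pvPen).sum := by
    unfold eval_row
    rcases row.foldl pvStepA ([], [], 0, 0) with ⟨a0, a1, az, ao⟩
    rfl
  rw [hA, pvA_loop row [] [] 0 0, pvLoopPen_filter]
  have hb : ∀ c ∈ row.filter (fun c => c == "0" || c == "1"), c = "0" ∨ c = "1" := by
    intro c hc
    have := List.of_mem_filter hc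
    rcases Bool.or_eq_true_iff.mp this with h | h
    · exact Or.inl (by simpa using h)
    · exact Or.inr (by simpa using h)
  generalize hL : row.filter (fun c => c == "0" || c == "1") = l at hb ⊢
  unfold eval_row_alt
  rw [hL]
  cases l with
  | nil => simp [pvLoopPen, pvRunPen, pvPen_zero]
  | cons b t =>
    have hbt : ∀ c ∈ t, c = "0" ∨ c = "1" := fun c hc => hb c (List.mem_cons_of_mem _ hc)
    rcases hb b List.mem_cons_self with h | h <;> subst h
    · have hstep : pvLoopPen 0 0 ("0" :: t) = pvPen 0 + pvLoopPen 1 0 t := by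
        simp [pvLoopPen]
      rw [hstep, pvPen_zero, (pvRuns t hbt).2 1]
      simp [pvRunPen, pvPen]
    · have hstep : pvLoopPen 0 0 ("1" :: t) = pvPen 0 + pvLoopPen 0 1 t := by
        simp [pvLoopPen]
      rw [hstep, pvPen_zero, (pvRuns t hbt).1 1]
      simp [pvRunPen, pvPen]

-- ===== VERDICT (by name: the statement is the Claim_ definition above) =====
theorem eval_row_spec : Claim_equal_eval_row := by
  intro row _
  unfold Spec_eval_row
  exact eval_row_eq row
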